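-- pv_equiv track=rewrite | github.com/starsummer/OCR-models | tools/eval.py | get_edit_distance
-- ===== SOURCE A (Python) =====
-- def minEditDistance(str1, str2):
--     # str2 = str2.replace('EOF','')
--     str1 = str1.lower()
--     str2 = str2.lower()
--
--     len_str1 = len(str1) + 1
--     len_str2 = len(str2) + 1
--     # 创建矩阵
--     matrix = [0 for n in range(len_str1 * len_str2)]
--     #矩阵的第一行
--     for i in range(len_str1):
--         matrix[i] = i
--     # 矩阵的第一列
--     for j in range(0, len(matrix), len_str1):
--         if j % len_str1 == 0:
--             matrix[j] = j // len_str1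
--      # 根据状态转移方程逐步得到编辑距离
--     for i in range(1, len_str1):
--         for j in range(1, len_str2):
--             if str1[i-1] == str2[j-1]:
--                 cost = 0
--             else:
--                 cost = 1
--             matrix[j*len_str1+i] = min(matrix[(j-1)*len_str1+i]+1,
--                     matrix[j*len_str1+(i-1)]+1,
--                     matrix[(j-1)*len_str1+(i-1)] + cost)
--     return matrix[-1]
--
-- def get_edit_distance(list1,list2):
--     assert len(list1) == len(list2)
--     total_length = 0
--     dis = 0
--     for i in range(len(list2)):
--         total_length += len(list1[i])
--         dis += minEditDistance(list1[i], list2[i])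
--     return dis,total_length
-- ===== SOURCE B (Python) =====
-- def minEditDistance(str1, str2):
--     s1 = str1.lower()
--     s2 = str2.lower()
--     memo = {}
--     def d(i, j):
--         if (i, j) in memo:
--             return memo[(i, j)]
--         if i == 0:
--             r = j
--         elif j == 0:
--             r = i
--         else:
--             r = min(d(i - 1, j) + 1, d(i, j - 1) + 1,
--                     d(i - 1, j - 1) + (0 if s1[i - 1] == s2[j - 1] else 1))
--         memo[(i, j)] = r
--         return r
--     return d(len(s1), len(s2))
--
-- def get_edit_distance(list1, list2):
--     assert len(list1) == len(list2)
--     dis = sum(minEditDistance(a, b) for a, b in zip(list1, list2))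
--     total_length = sum(len(a) for a in list1)
--     return dis, total_length
-- ===== Notes on version B (the rewrite author's own statement) =====
-- stated objective: alternative
-- what changed: minEditDistance's bottom-up DP over a flat (len1+1)*(len2+1) matrix with flattened-index arithmetic and two initialisation passes is replaced by a top-down recursive d(i,j) memoized in a dict (only reached subproblems are computed, no matrix or index arithmetic), and get_edit_distance's index loop with two running accumulators becomes a zip-sum plus a length-sum.
import Mathlib
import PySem

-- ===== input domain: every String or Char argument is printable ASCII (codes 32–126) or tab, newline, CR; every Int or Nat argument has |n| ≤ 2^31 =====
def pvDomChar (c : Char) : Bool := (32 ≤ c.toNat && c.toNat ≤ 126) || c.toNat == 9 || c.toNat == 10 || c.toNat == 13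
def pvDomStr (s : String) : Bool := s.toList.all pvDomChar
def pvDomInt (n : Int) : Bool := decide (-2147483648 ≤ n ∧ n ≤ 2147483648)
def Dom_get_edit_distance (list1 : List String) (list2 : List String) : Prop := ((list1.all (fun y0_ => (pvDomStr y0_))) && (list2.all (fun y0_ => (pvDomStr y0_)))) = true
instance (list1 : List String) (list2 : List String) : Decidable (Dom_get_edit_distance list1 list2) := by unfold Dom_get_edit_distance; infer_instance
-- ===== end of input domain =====

-- B replaces A's bottom-up flat (len1*len2) matrix DP with flattened-index arithmetic by a
-- top-down recursive d(i,j) memoized in a dict, and the top-level index loop by a zip-sum;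
-- objective: alternative (same asymptotic cost, different algorithmic organisation).


-- ===== PORT A =====
-- literal transliteration of Source A's minEditDistance (flat matrix, flattened indices);
-- the pyGetD reads with default 0 are exact: every index the loops produce is in range.
def minEditDistanceA (str1 : String) (str2 : String) : Int :=
  let s1 := PySem.Chars.lower str1.toList
  let s2 := PySem.Chars.lower str2.toList
  let len1 : Int := (s1.length : Int) + 1
  let len2 : Int := (s2.length : Int) + 1
  let matrix : List Int := (PySem.List.pyRange 0 (len1 * len2) 1).map (fun _ => (0 : Int))
  let matrix := (PySem.List.pyRange 0 len1 1).foldl (fun m i => PySem.List.pySetD m i i) matrix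
  let matrix := (PySem.List.pyRange 0 (PySem.List.len matrix) len1).foldl
    (fun m j => if PySem.Int.mod j len1 == 0 then PySem.List.pySetD m j (PySem.Int.floordiv j len1) else m) matrix
  let matrix := (PySem.List.pyRange 1 len1 1).foldl (fun m i =>
    (PySem.List.pyRange 1 len2 1).foldl (fun m j =>
      let cost : Int := if PySem.List.pyGet? s1 (i - 1) == PySem.List.pyGet? s2 (j - 1) then 0 else 1
      PySem.List.pySetD m (j * len1 + i)
        (min (min (PySem.List.pyGetD m ((j - 1) * len1 + i) 0 + 1)
                  (PySem.List.pyGetD m (j * len1 + (i - 1)) 0 + 1))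
             (PySem.List.pyGetD m ((j - 1) * len1 + (i - 1)) 0 + cost))) m) matrix
  PySem.List.pyGetD matrix (-1) 0

-- the assert is Pre_get_edit_distance; the "" defaults are never used on Pre_ (i < len of both lists)
def get_edit_distance (list1 : List String) (list2 : List String) : Int × Int :=
  let r := (PySem.List.pyRange 0 (PySem.List.len list2) 1).foldl
    (fun (acc : Int × Int) i =>
      (acc.1 + minEditDistanceA (PySem.List.pyGetD list1 i "") (PySem.List.pyGetD list2 i ""),
       acc.2 + PySem.Str.len (PySem.List.pyGetD list1 i "")))
    (0, 0)
  (r.1, r.2)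

-- ===== PORT B =====
-- transliteration of Source B's inner helper d(i,j): top-down recursion, the memo dict threaded
-- through as part of the result (Python mutates the closed-over dict; same reads and writes,
-- recursive calls in the same order)
def dMemoB (s t : List Char) (i j : Nat) (memo : PySem.Dict (Int × Int) Int) :
    Int × PySem.Dict (Int × Int) Int :=
  match PySem.Dict.get? memo ((i : Int), (j : Int)) with
  | some v => (v, memo)
  | none =>
    if i = 0 then
      ((j : Int), PySem.Dict.insert memo ((i : Int), (j : Int)) (j : Int))
    else if j = 0 then
      ((i : Int), PySem.Dict.insert memo ((i : Int), (j : Int)) (i : Int))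
    else
      let p1 := dMemoB s t (i - 1) j memo
      let p2 := dMemoB s t i (j - 1) p1.2
      let p3 := dMemoB s t (i - 1) (j - 1) p2.2
      let r := min (min (p1.1 + 1) (p2.1 + 1))
          (p3.1 + (if s[i - 1]? == t[j - 1]? then 0 else 1))
      (r, PySem.Dict.insert p3.2 ((i : Int), (j : Int)) r)
termination_by (i, j)

def minEditDistanceB (str1 : String) (str2 : String) : Int :=
  let s1 := PySem.Chars.lower str1.toList
  let s2 := PySem.Chars.lower str2.toList
  (dMemoB s1 s2 s1.length s2.length PySem.Dict.empty).1

def get_edit_distance_alt (list1 : List String) (list2 : List String) : Int × Int :=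
  let dis := ((list1.zip list2).map (fun p => minEditDistanceB p.1 p.2)).sum
  let total := (list1.map (fun a => PySem.Str.len a)).sum
  (dis, total)

-- ===== PRECONDITION & SPEC =====
-- A's assert raises AssertionError when the lists have different lengths; exactly that is excluded.
def Pre_get_edit_distance (list1 : List String) (list2 : List String) : Prop :=
  list1.length = list2.length
instance (list1 : List String) (list2 : List String) : Decidable (Pre_get_edit_distance list1 list2) := by
  unfold Pre_get_edit_distance; infer_instance

def pvWitness_get_edit_distance : List String × List String := (["kitten", "Ab"], ["sitting", "ba"])

def Spec_get_edit_distance (list1 : List String) (list2 : List String) (out : Int × Int) : Prop := out = get_edit_distance_alt list1 list2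
instance (list1 : List String) (list2 : List String) (out : Int × Int) : Decidable (Spec_get_edit_distance list1 list2 out) := by unfold Spec_get_edit_distance; infer_instance

-- ===== CLAIM (what is proved, stated in full; the proofs are below) =====
def Claim_equal_get_edit_distance : Prop := ∀ (list1 : List String) (list2 : List String), Dom_get_edit_distance list1 list2 → Pre_get_edit_distance list1 list2 → Spec_get_edit_distance list1 list2 (get_edit_distance list1 list2)

-- ===== LEMMAS AND PROOFS =====

-- the Levenshtein prefix value both programs compute: dSpec s t i j = distance between the
-- first i chars of s and the first j chars of t, recurrence exactly as the programs state it
def dSpec (s t : List Char) : Nat → Nat → Int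
  | 0, j => (j : Int)
  | i+1, 0 => ((i : Int) + 1)
  | i+1, j+1 =>
      min (min (dSpec s t i (j+1) + 1) (dSpec s t (i+1) j + 1))
          (dSpec s t i j + (if s[i]? == t[j]? then 0 else 1))
  termination_by i j => (i, j)

theorem getD_set_ite (l : List Int) (i k : Nat) (v : Int) :
    (l.set i v).getD k 0 = if k = i ∧ i < l.length then v else l.getD k 0 := by
  simp only [List.getD_eq_getElem?_getD, List.getElem?_set]
  split_ifs <;> simp_all

theorem cell_inj {K i i' j j' : Nat} (hi : i < K) (hi' : i' < K)
    (h : j * K + i = j' * K + i') : j = j' ∧ i = i' := by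
  have h' : K * j + i = K * j' + i' := by
    rw [Nat.mul_comm K j, Nat.mul_comm K j']; exact h
  have e1 : (K * j + i) % K = i := by rw [Nat.mul_add_mod, Nat.mod_eq_of_lt hi]
  have e2 : (K * j' + i') % K = i' := by rw [Nat.mul_add_mod, Nat.mod_eq_of_lt hi']
  have hii : i = i' := by rw [← e1, ← e2, h']
  refine ⟨?_, hii⟩
  have hKj : K * j = K * j' := by omega
  exact Nat.eq_of_mul_eq_mul_left (by omega) hKj

-- ---- B side: the memo invariant and correctness of the memoized recursion ----

def MemoOK (s t : List Char) (memo : PySem.Dict (Int × Int) Int) : Prop :=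
  ∀ (i j : Nat) (v : Int), PySem.Dict.get? memo ((i : Int), (j : Int)) = some v →
    v = dSpec s t i j

theorem memoOK_insert (s t : List Char) (memo : PySem.Dict (Int × Int) Int)
    (hm : MemoOK s t memo) (i j : Nat) (v : Int) (hv : v = dSpec s t i j) :
    MemoOK s t (PySem.Dict.insert memo ((i : Int), (j : Int)) v) := by
  intro i' j' v' hget
  rw [PySem.Dict.get?_insert] at hget
  split_ifs at hget with heq
  · obtain ⟨hi, hj⟩ := Prod.mk.injEq .. ▸ heq
    have hi' : i' = i := by exact_mod_cast hi
    have hj' : j' = j := by exact_mod_cast hj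
    subst hi' hj'
    cases hget
    exact hv
  · exact hm i' j' v' hget

theorem dMemoB_spec (s t : List Char) :
    ∀ (n i j : Nat) (memo : PySem.Dict (Int × Int) Int), i + j ≤ n → MemoOK s t memo →
    (dMemoB s t i j memo).1 = dSpec s t i j ∧ MemoOK s t (dMemoB s t i j memo).2 := by
  intro n
  induction n with
  | zero =>
    intro i j memo hle hm
    have hi : i = 0 := by omega
    have hj : j = 0 := by omega
    subst hi hj
    rw [dMemoB]
    cases hget : PySem.Dict.get? memo (((0 : Nat) : Int), ((0 : Nat) : Int)) with
    | some v =>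
      exact ⟨hm 0 0 v hget, hm⟩
    | none =>
      refine ⟨?_, ?_⟩
      · show ((0 : Nat) : Int) = dSpec s t 0 0
        rw [dSpec]
      · show MemoOK s t (PySem.Dict.insert memo _ _)
        exact memoOK_insert s t memo hm 0 0 _ (by rw [dSpec])
  | succ n ih =>
    intro i j memo hle hm
    rw [dMemoB]
    cases hget : PySem.Dict.get? memo ((i : Int), (j : Int)) with
    | some v =>
      exact ⟨hm i j v hget, hm⟩
    | none =>
      by_cases hi : i = 0
      · subst hi
        refine ⟨?_, ?_⟩
        · show ((j : Nat) : Int) = dSpec s t 0 j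
          rw [dSpec]
        · show MemoOK s t (PySem.Dict.insert memo _ _)
          exact memoOK_insert s t memo hm 0 j _ (by rw [dSpec])
      · by_cases hj : j = 0
        · subst hj
          simp only [if_neg hi]
          obtain ⟨i', rfl⟩ := Nat.exists_eq_succ_of_ne_zero hi
          refine ⟨?_, ?_⟩
          · show (((i' + 1 : Nat)) : Int) = dSpec s t (i' + 1) 0
            rw [dSpec]; push_cast; ring
          · show MemoOK s t (PySem.Dict.insert memo _ _)
            exact memoOK_insert s t memo hm (i' + 1) 0 _ (by rw [dSpec]; push_cast; ring)
        · simp only [if_neg hi, if_neg hj]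
          obtain ⟨i', rfl⟩ := Nat.exists_eq_succ_of_ne_zero hi
          obtain ⟨j', rfl⟩ := Nat.exists_eq_succ_of_ne_zero hj
          have h1 := ih i' (j' + 1) memo (by omega) hm
          have h2 := ih (i' + 1) j' (dMemoB s t i' (j' + 1) memo).2 (by omega) h1.2
          have h3 := ih i' j' (dMemoB s t (i' + 1) j' (dMemoB s t i' (j' + 1) memo).2).2
            (by omega) h2.2
          simp only [Nat.succ_sub_one]
          rw [h1.1, h2.1, h3.1]
          have hval : min (min (dSpec s t i' (j' + 1) + 1) (dSpec s t (i' + 1) j' + 1))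
              (dSpec s t i' j' + (if s[i']? == t[j']? then 0 else 1))
              = dSpec s t (i' + 1) (j' + 1) := by rw [dSpec]
          exact ⟨hval, memoOK_insert s t _ h3.2 (i' + 1) (j' + 1) _ hval⟩

theorem memoOK_empty (s t : List Char) : MemoOK s t PySem.Dict.empty := by
  intro i j v hget
  rw [PySem.Dict.get?_empty] at hget
  cases hget

theorem medB_eq (str1 str2 : String) :
    minEditDistanceB str1 str2
      = dSpec (PySem.Chars.lower str1.toList) (PySem.Chars.lower str2.toList)
          (PySem.Chars.lower str1.toList).length (PySem.Chars.lower str2.toList).length := by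
  unfold minEditDistanceB
  exact (dMemoB_spec _ _ (_ + _) _ _ PySem.Dict.empty (le_refl _) (memoOK_empty _ _)).1

-- ---- A side ----

def stage0 (m n : Nat) : List Int :=
  (PySem.List.pyRange 0 (((m : Int) + 1) * ((n : Int) + 1)) 1).map (fun _ => (0 : Int))

def stage1 (m : Nat) (M : List Int) : List Int :=
  (PySem.List.pyRange 0 ((m : Int) + 1) 1).foldl (fun mm i => PySem.List.pySetD mm i i) M

def stage2 (m : Nat) (M : List Int) : List Int :=
  (PySem.List.pyRange 0 (PySem.List.len M) ((m : Int) + 1)).foldl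
    (fun mm j => if PySem.Int.mod j ((m : Int) + 1) == 0
                 then PySem.List.pySetD mm j (PySem.Int.floordiv j ((m : Int) + 1)) else mm) M

def innerF (s t : List Char) (i : Int) (mm : List Int) (j : Int) : List Int :=
  let cost : Int := if PySem.List.pyGet? s (i - 1) == PySem.List.pyGet? t (j - 1) then 0 else 1
  PySem.List.pySetD mm (j * ((s.length : Int) + 1) + i)
    (min (min (PySem.List.pyGetD mm ((j - 1) * ((s.length : Int) + 1) + i) 0 + 1)
              (PySem.List.pyGetD mm (j * ((s.length : Int) + 1) + (i - 1)) 0 + 1))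
         (PySem.List.pyGetD mm ((j - 1) * ((s.length : Int) + 1) + (i - 1)) 0 + cost))

def stage3 (s t : List Char) (M : List Int) : List Int :=
  (PySem.List.pyRange 1 ((s.length : Int) + 1) 1).foldl (fun mm i =>
    (PySem.List.pyRange 1 ((t.length : Int) + 1) 1).foldl (fun mm j => innerF s t i mm j) mm) M

def Aport (str1 str2 : String) : Int :=
  let s := PySem.Chars.lower str1.toList
  let t := PySem.Chars.lower str2.toList
  PySem.List.pyGetD (stage3 s t (stage2 s.length (stage1 s.length (stage0 s.length t.length)))) (-1) 0

theorem medA_rfl (str1 str2 : String) : minEditDistanceA str1 str2 = Aport str1 str2 := rfl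

theorem loop1_spec (K : Nat) (M : List Int) :
    (((PySem.List.pyRange 0 ((K : Nat) : Int) 1).foldl (fun mm i => PySem.List.pySetD mm i i) M).length = M.length) ∧
    (∀ k, ((PySem.List.pyRange 0 ((K : Nat) : Int) 1).foldl (fun mm i => PySem.List.pySetD mm i i) M).getD k 0
        = if k < K ∧ k < M.length then (k : Int) else M.getD k 0) := by
  induction K with
  | zero =>
    rw [PySem.List.pyRange_one_eq_nil (by omega)]
    simp
  | succ K ih =>
    rw [show ((K + 1 : Nat) : Int) = ((K : Nat) : Int) + 1 by push_cast; ring]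
    rw [PySem.List.pyRange_one_succ_right (by omega)]
    rw [List.foldl_append, List.foldl_cons, List.foldl_nil]
    rw [PySem.List.pySetD_natCast]
    constructor
    · rw [List.length_set]; exact ih.1
    · intro k
      rw [getD_set_ite, ih.1, ih.2]
      by_cases h1 : k = K
      · subst h1
        by_cases h2 : k < M.length <;> simp [h2]
      · by_cases h2 : k < K ∧ k < M.length <;> simp_all
        · intro h
          exfalso
          omega
        · split_ifs <;> first | rfl | (exfalso; omega)

theorem loop2_spec (m T : Nat) (M : List Int) (h : ∀ j, j < T → j * (m + 1) < M.length) :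
    (((List.range T).foldl (fun mm k => mm.set (k * (m + 1)) (k : Int)) M).length = M.length) ∧
    (∀ j, j < T → ((List.range T).foldl (fun mm k => mm.set (k * (m + 1)) (k : Int)) M).getD (j * (m + 1)) 0 = (j : Int)) ∧
    (∀ kk, (∀ j, j < T → kk ≠ j * (m + 1)) →
      ((List.range T).foldl (fun mm k => mm.set (k * (m + 1)) (k : Int)) M).getD kk 0 = M.getD kk 0) := by
  induction T with
  | zero => simp
  | succ T ih =>
    have ih' := ih (fun j hj => h j (by omega))
    rw [List.range_succ, List.foldl_append, List.foldl_cons, List.foldl_nil]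
    refine ⟨by rw [List.length_set]; exact ih'.1, ?_, ?_⟩
    · intro j hj
      rw [getD_set_ite, ih'.1]
      by_cases hjT : j = T
      · subst hjT
        have hcond : j * (m + 1) = j * (m + 1) ∧ j * (m + 1) < M.length := ⟨rfl, h j (by omega)⟩
        rw [if_pos hcond]
      · have hne : j * (m + 1) ≠ T * (m + 1) := by
          intro hcontra
          exact hjT (Nat.eq_of_mul_eq_mul_right (by omega) hcontra)
        rw [if_neg (by tauto)]
        exact ih'.2.1 j (by omega)
    · intro kk hkk
      rw [getD_set_ite]
      rw [if_neg (by exact fun hc => hkk T (by omega) hc.1)]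
      exact ih'.2.2 kk (fun j hj => hkk j (by omega))

-- invariant after the main loop has completed columns 1..c (plus the initialised row 0 / column 0)
def AInv (s t : List Char) (c : Nat) (M : List Int) : Prop :=
  M.length = (s.length + 1) * (t.length + 1) ∧
  (∀ i, i ≤ s.length → M.getD i 0 = (i : Int)) ∧
  (∀ j, j ≤ t.length → ∀ i, i ≤ c → M.getD (j * (s.length + 1) + i) 0 = dSpec s t i j)

theorem A_inner (s t : List Char) (c : Nat) (hc : c < s.length) (M : List Int)
    (hM : AInv s t c M) :
    ∀ r, r ≤ t.length →
    AInv s t c ((PySem.List.pyRange 1 (((r : Nat) : Int) + 1) 1).foldl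
        (fun mm j => innerF s t (((c + 1 : Nat) : Int)) mm j) M) ∧
    (∀ j, j ≤ r → ((PySem.List.pyRange 1 (((r : Nat) : Int) + 1) 1).foldl
        (fun mm j => innerF s t (((c + 1 : Nat) : Int)) mm j) M).getD
          (j * (s.length + 1) + (c + 1)) 0 = dSpec s t (c + 1) j) := by
  intro r
  induction r with
  | zero =>
    intro _
    rw [PySem.List.pyRange_one_eq_nil (by omega), List.foldl_nil]
    refine ⟨hM, ?_⟩
    intro j hj
    have hj0 : j = 0 := by omega
    subst hj0
    simp only [Nat.zero_mul, Nat.zero_add]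
    rw [hM.2.1 (c + 1) (by omega)]
    rw [dSpec]
    push_cast
    ring
  | succ r ih =>
    intro hr
    have ihr := ih (by omega)
    rw [show ((r + 1 : Nat) : Int) + 1 = (((r : Nat) : Int) + 1) + 1 by push_cast; ring]
    rw [PySem.List.pyRange_one_succ_right (by omega)]
    rw [List.foldl_append, List.foldl_cons, List.foldl_nil]
    set M' := (PySem.List.pyRange 1 (((r : Nat) : Int) + 1) 1).foldl
        (fun mm j => innerF s t (((c + 1 : Nat) : Int)) mm j) M with hM'
    obtain ⟨⟨hlen, hrow0, hcols⟩, hnew⟩ := ihr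
    unfold innerF
    simp only []
    have hj1 : ((r : Int) + 1) - 1 = ((r : Nat) : Int) := by ring
    have hi1 : ((c + 1 : Nat) : Int) - 1 = ((c : Nat) : Int) := by push_cast; ring
    rw [hj1, hi1]
    have e1 : ((r : Int) + 1) * ((s.length : Int) + 1) + ((c + 1 : Nat) : Int)
        = (((r + 1) * (s.length + 1) + (c + 1) : Nat) : Int) := by push_cast; ring
    have e2 : ((r : Nat) : Int) * ((s.length : Int) + 1) + ((c + 1 : Nat) : Int)
        = ((r * (s.length + 1) + (c + 1) : Nat) : Int) := by push_cast; ring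
    have e3 : ((r : Int) + 1) * ((s.length : Int) + 1) + ((c : Nat) : Int)
        = (((r + 1) * (s.length + 1) + c : Nat) : Int) := by push_cast; ring
    have e4 : ((r : Nat) : Int) * ((s.length : Int) + 1) + ((c : Nat) : Int)
        = ((r * (s.length + 1) + c : Nat) : Int) := by push_cast; ring
    rw [e1, e2, e3, e4]
    rw [PySem.List.pySetD_natCast, PySem.List.pyGetD_natCast, PySem.List.pyGetD_natCast,
        PySem.List.pyGetD_natCast]
    rw [PySem.List.pyGet?_natCast, PySem.List.pyGet?_natCast]
    rw [hnew r (by omega)]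
    rw [hcols (r + 1) (by omega) c (by omega)]
    rw [hcols r (by omega) c (by omega)]
    have hval : min (min (dSpec s t (c + 1) r + 1) (dSpec s t c (r + 1) + 1))
          (dSpec s t c r + if s[c]? == t[r]? then 0 else 1)
        = dSpec s t (c + 1) (r + 1) := by
      rw [dSpec]
      rw [min_comm (dSpec s t (c + 1) r + 1) (dSpec s t c (r + 1) + 1)]
    rw [hval]
    have hidx : (r + 1) * (s.length + 1) + (c + 1) < M'.length := by
      rw [hlen]
      have h1 : (r + 1) * (s.length + 1) ≤ t.length * (s.length + 1) :=
        Nat.mul_le_mul_right _ (by omega)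
      have h2 : t.length * (s.length + 1) + (s.length + 1) = (s.length + 1) * (t.length + 1) := by ring
      omega
    refine ⟨⟨?_, ?_, ?_⟩, ?_⟩
    · rw [List.length_set]; exact hlen
    · intro i hi
      rw [getD_set_ite]
      rw [if_neg ?_]
      · exact hrow0 i hi
      · rintro ⟨hik, _⟩
        have h1 : (s.length + 1) ≤ (r + 1) * (s.length + 1) :=
          Nat.le_mul_of_pos_left _ (by omega)
        omega
    · intro j hj i hi
      rw [getD_set_ite]
      rw [if_neg ?_]
      · exact hcols j hj i hi
      · rintro ⟨heq, _⟩
        obtain ⟨_, hieq⟩ := cell_inj (K := s.length + 1) (by omega) (by omega) heq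
        omega
    · intro j hj
      by_cases hjr : j = r + 1
      · subst hjr
        rw [getD_set_ite, if_pos ⟨rfl, hidx⟩]
      · rw [getD_set_ite]
        rw [if_neg ?_]
        · exact hnew j (by omega)
        · rintro ⟨heq, _⟩
          obtain ⟨hjeq, _⟩ := cell_inj (K := s.length + 1) (by omega) (by omega) heq
          omega

theorem A_outer (s t : List Char) (M : List Int) (hM : AInv s t 0 M) :
    ∀ c, c ≤ s.length →
    AInv s t c ((PySem.List.pyRange 1 (((c : Nat) : Int) + 1) 1).foldl
      (fun mm i => (PySem.List.pyRange 1 ((t.length : Int) + 1) 1).foldl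
        (fun mm j => innerF s t i mm j) mm) M) := by
  intro c
  induction c with
  | zero =>
    intro _
    rw [PySem.List.pyRange_one_eq_nil (a := 1) (b := ((0 : Nat) : Int) + 1) (by omega), List.foldl_nil]
    exact hM
  | succ c ih =>
    intro hc
    have ihc := ih (by omega)
    rw [show (((c + 1 : Nat) : Int)) + 1 = ((((c : Nat) : Int)) + 1) + 1 by push_cast; ring]
    rw [PySem.List.pyRange_one_succ_right (a := 1) (b := ((c : Nat) : Int) + 1) (by omega)]
    rw [List.foldl_append, List.foldl_cons, List.foldl_nil]
    set M' := (PySem.List.pyRange 1 (((c : Nat) : Int) + 1) 1).foldl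
      (fun mm i => (PySem.List.pyRange 1 ((t.length : Int) + 1) 1).foldl
        (fun mm j => innerF s t i mm j) mm) M with hM'
    have hcast : ((c : Nat) : Int) + 1 = ((c + 1 : Nat) : Int) := by push_cast; ring
    rw [hcast]
    have hconv : ((t.length : Int) + 1) = (((t.length : Nat) : Int) + 1) := rfl
    rw [hconv]
    have hAI := A_inner s t c (by omega) M' ihc t.length (le_refl _)
    obtain ⟨⟨hlen, hrow0, hcols⟩, hnew⟩ := hAI
    refine ⟨hlen, hrow0, ?_⟩
    intro j hj i hi
    by_cases hic : i ≤ c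
    · exact hcols j hj i hic
    · have hieq : i = c + 1 := by omega
      subst hieq
      exact hnew j hj

theorem medA_eq' (s t : List Char) :
    PySem.List.pyGetD (stage3 s t (stage2 s.length (stage1 s.length (stage0 s.length t.length)))) (-1) 0
      = dSpec s t s.length t.length := by
  -- stage 0
  have h0len : (stage0 s.length t.length).length = (s.length + 1) * (t.length + 1) := by
    unfold stage0
    rw [show ((s.length : Int) + 1) * ((t.length : Int) + 1)
        = (((s.length + 1) * (t.length + 1) : Nat) : Int) by push_cast; ring]
    rw [PySem.List.pyRange_zero_nat]
    simp
  have h0get : ∀ k, (stage0 s.length t.length).getD k 0 = 0 := by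
    intro k
    unfold stage0
    rw [List.getD_eq_getElem?_getD, List.getElem?_map]
    cases h : (PySem.List.pyRange 0 (((s.length : Int) + 1) * ((t.length : Int) + 1)) 1)[k]? <;> simp
  -- stage 1
  have h1 := loop1_spec (s.length + 1) (stage0 s.length t.length)
  rw [show ((s.length + 1 : Nat) : Int) = (s.length : Int) + 1 by push_cast; ring] at h1
  have h1' : stage1 s.length (stage0 s.length t.length)
      = (PySem.List.pyRange 0 ((s.length : Int) + 1) 1).foldl
        (fun mm i => PySem.List.pySetD mm i i) (stage0 s.length t.length) := rfl
  have h1len : (stage1 s.length (stage0 s.length t.length)).length = (s.length + 1) * (t.length + 1) := by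
    rw [h1', h1.1, h0len]
  have h1get : ∀ k, (stage1 s.length (stage0 s.length t.length)).getD k 0
      = if k < s.length + 1 then (k : Int) else 0 := by
    intro k
    rw [h1', h1.2 k, h0len, h0get]
    by_cases hk : k < s.length + 1
    · have hkL : k < (s.length + 1) * (t.length + 1) := by
        have hx : (s.length + 1) * 1 ≤ (s.length + 1) * (t.length + 1) :=
          Nat.mul_le_mul_left _ (by omega)
        omega
      simp [hk, hkL]
    · simp [hk]
  -- stage 2
  have h2eq : stage2 s.length (stage1 s.length (stage0 s.length t.length))
      = (List.range (t.length + 1)).foldl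
        (fun mm k => mm.set (k * (s.length + 1)) (k : Int)) (stage1 s.length (stage0 s.length t.length)) := by
    unfold stage2
    rw [show PySem.List.len (stage1 s.length (stage0 s.length t.length))
        = (((s.length + 1) * (t.length + 1) : Nat) : Int) by
      rw [PySem.List.len_eq, h1len]]
    rw [PySem.List.pyRange_of_pos _ _ (by positivity)]
    have hT : (if (0 : Int) < (((s.length + 1) * (t.length + 1) : Nat) : Int) then
        (((((s.length + 1) * (t.length + 1) : Nat) : Int) - 0 + ((s.length : Int) + 1) - 1) / ((s.length : Int) + 1)).toNat
        else 0) = t.length + 1 := by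
      rw [if_pos (by positivity)]
      rw [show ((((s.length + 1) * (t.length + 1) : Nat) : Int) - 0 + ((s.length : Int) + 1) - 1)
          = (((s.length + 1) * (t.length + 1) + s.length : Nat) : Int) by push_cast; ring]
      rw [show ((s.length : Int) + 1) = ((s.length + 1 : Nat) : Int) by push_cast; ring]
      rw [← Int.natCast_div]
      rw [show ((s.length + 1) * (t.length + 1) + s.length) / (s.length + 1) = t.length + 1 by
        rw [Nat.mul_add_div (by omega)]
        rw [Nat.div_eq_of_lt (by omega)]]
      simp
    rw [hT]
    rw [List.foldl_map]
    apply PySem.List.foldl_congr_mem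
    intro mm k hk
    have hel : (0 : Int) + ((s.length : Int) + 1) * (k : Int) = ((k * (s.length + 1) : Nat) : Int) := by
      push_cast; ring
    rw [hel]
    rw [if_pos (by simp)]
    rw [show ((s.length : Int) + 1) = ((s.length + 1 : Nat) : Int) by push_cast; ring]
    rw [PySem.Int.floordiv_natCast]
    rw [Nat.mul_div_cancel _ (by omega)]
    rw [PySem.List.pySetD_natCast]
  have h2 := loop2_spec s.length (t.length + 1) (stage1 s.length (stage0 s.length t.length)) (by
    intro j hj
    rw [h1len]
    have h1b : j * (s.length + 1) ≤ t.length * (s.length + 1) := Nat.mul_le_mul_right _ (by omega)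
    have h2b : t.length * (s.length + 1) + (s.length + 1) = (s.length + 1) * (t.length + 1) := by ring
    omega)
  rw [← h2eq] at h2
  -- invariant after initialisation
  have hInit : AInv s t 0 (stage2 s.length (stage1 s.length (stage0 s.length t.length))) := by
    refine ⟨by rw [h2.1, h1len], ?_, ?_⟩
    · intro i hi
      by_cases hi0 : i = 0
      · subst hi0
        have hz := h2.2.1 0 (by omega)
        simpa using hz
      · rw [h2.2.2 i ?_]
        · rw [h1get, if_pos (by omega)]
        · intro j hj hne
          rcases Nat.eq_zero_or_pos j with hj0 | hjpos
          · subst hj0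
            simp at hne
            omega
          · subst hne
            have hge : s.length + 1 ≤ j * (s.length + 1) := by
              calc s.length + 1 = 1 * (s.length + 1) := by ring
                _ ≤ j * (s.length + 1) := Nat.mul_le_mul_right _ hjpos
            omega
    · intro j hj i hi
      have hi0 : i = 0 := by omega
      subst hi0
      rw [Nat.add_zero]
      rw [h2.2.1 j (by omega)]
      rw [dSpec]
  -- main loops
  have h3 : stage3 s t (stage2 s.length (stage1 s.length (stage0 s.length t.length)))
      = (PySem.List.pyRange 1 (((s.length : Nat) : Int) + 1) 1).foldl
        (fun mm i => (PySem.List.pyRange 1 ((t.length : Int) + 1) 1).foldl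
          (fun mm j => innerF s t i mm j) mm) (stage2 s.length (stage1 s.length (stage0 s.length t.length))) := rfl
  have hfin := A_outer s t _ hInit s.length (le_refl _)
  rw [← h3] at hfin
  obtain ⟨hlen, _, hcols⟩ := hfin
  have hpos : 0 < (stage3 s t (stage2 s.length (stage1 s.length (stage0 s.length t.length)))).length := by
    rw [hlen]
    exact Nat.mul_pos (by omega) (by omega)
  have hne0 : stage3 s t (stage2 s.length (stage1 s.length (stage0 s.length t.length))) ≠ [] :=
    List.ne_nil_of_length_pos hpos
  rw [PySem.List.pyGetD_neg_one _ _ hne0, List.getLast_eq_getElem]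
  have hcell := hcols t.length (le_refl _) s.length (le_refl _)
  have hlt : t.length * (s.length + 1) + s.length
      < (stage3 s t (stage2 s.length (stage1 s.length (stage0 s.length t.length)))).length := by
    rw [hlen]
    have hx : t.length * (s.length + 1) + (s.length + 1) = (s.length + 1) * (t.length + 1) := by ring
    omega
  rw [List.getD_eq_getElem?_getD, List.getElem?_eq_getElem hlt, Option.getD_some] at hcell
  have hidx2 : (stage3 s t (stage2 s.length (stage1 s.length (stage0 s.length t.length)))).length - 1
      = t.length * (s.length + 1) + s.length := by
    rw [hlen]
    have hx : t.length * (s.length + 1) + (s.length + 1) = (s.length + 1) * (t.length + 1) := by ring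
    omega
  simp only [hidx2]
  exact hcell

theorem medA_eq (str1 str2 : String) :
    minEditDistanceA str1 str2
      = dSpec (PySem.Chars.lower str1.toList) (PySem.Chars.lower str2.toList)
          (PySem.Chars.lower str1.toList).length (PySem.Chars.lower str2.toList).length := by
  rw [medA_rfl]
  exact medA_eq' _ _

theorem med_eq (str1 str2 : String) : minEditDistanceA str1 str2 = minEditDistanceB str1 str2 := by
  rw [medA_eq, medB_eq]

theorem zip_getD (l1 l2 : List String) (k : Nat) (h : l1.length = l2.length)
    (hk : k < l2.length) :
    (l1.zip l2).getD k ("", "") = (l1.getD k "", l2.getD k "") := by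
  have hk1 : k < (l1.zip l2).length := by rw [List.length_zip]; omega
  rw [List.getD_eq_getElem?_getD, List.getElem?_eq_getElem hk1]
  rw [List.getElem_zip]
  rw [List.getD_eq_getElem?_getD, List.getElem?_eq_getElem (by omega)]
  rw [List.getD_eq_getElem?_getD, List.getElem?_eq_getElem (by omega)]
  rfl

-- ===== VERDICT (by name: the statement is the Claim_ definition above) =====
theorem get_edit_distance_spec : Claim_equal_get_edit_distance := by
  intro list1 list2 _ hpre
  unfold Pre_get_edit_distance at hpre
  unfold Spec_get_edit_distance get_edit_distance get_edit_distance_alt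
  simp only []
  rw [PySem.List.foldl_prod_mk
      (f := fun acc i => acc + minEditDistanceA (PySem.List.pyGetD list1 i "") (PySem.List.pyGetD list2 i ""))
      (g := fun acc i => acc + PySem.Str.len (PySem.List.pyGetD list1 i ""))]
  refine Prod.ext ?_ ?_
  · -- distance component
    simp only []
    have hzlen : (list1.zip list2).length = list2.length := by
      rw [List.length_zip]; omega
    have hcongr : (PySem.List.pyRange 0 (PySem.List.len list2) 1).foldl
        (fun acc i => acc + minEditDistanceA (PySem.List.pyGetD list1 i "") (PySem.List.pyGetD list2 i "")) 0
        = (PySem.List.pyRange 0 ((list1.zip list2).length : Int) 1).foldl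
        (fun acc i => acc + minEditDistanceB (PySem.List.pyGetD (list1.zip list2) i ("", "")).1
            (PySem.List.pyGetD (list1.zip list2) i ("", "")).2) 0 := by
      rw [show ((list1.zip list2).length : Int) = PySem.List.len list2 by
        rw [PySem.List.len_eq, hzlen]]
      apply PySem.List.foldl_congr_mem
      intro acc x hx
      have hb := PySem.List.mem_pyRange_one.mp hx
      rw [PySem.List.len_eq] at hb
      have hx0 : 0 ≤ x := hb.1
      have hxlt : x.toNat < list2.length := by omega
      rw [PySem.List.pyGetD_of_nonneg _ _ hx0, PySem.List.pyGetD_of_nonneg _ _ hx0,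
          PySem.List.pyGetD_of_nonneg _ _ hx0]
      rw [zip_getD list1 list2 x.toNat hpre hxlt]
      rw [med_eq]
    rw [hcongr]
    rw [PySem.List.foldl_pyRange_zero_pyGetD' (list1.zip list2) ("", "")
        (fun acc p => acc + minEditDistanceB p.1 p.2) 0]
    rw [PySem.List.foldl_add]
    simp only [zero_add]
  · -- length component
    simp only []
    rw [show PySem.List.len list2 = ((list1.length : Nat) : Int) by
      rw [PySem.List.len_eq, hpre]]
    rw [PySem.List.foldl_pyRange_zero_pyGetD' list1 ""
        (fun acc s => acc + PySem.Str.len s) 0]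
    rw [PySem.List.foldl_add]
    simp only [zero_add]
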